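/- GENERATED by tools/from_farm_form.py from prooffarm-gif/accepted/DGifGetCodeNext.1/Proof.lean (a worked proof of the farm's unit `DGifGetCodeNext.1`,
   accepted by the verdict) — do not edit. -/
import Gif.Spec.Units.DGifGetCodeNext_1
import Gif.Spec.AllSegs
import Gif.Spec.Proved.DGifGetCodeNext_1_Lemmas

open X86 X86.User Asan ProgX.Base ProgX.Base.Spec Gif.Spec

/-!
  `DGifGetCodeNext.1` (0x109f8c … 0x109fc6, 14 instructions; dgif_lib.c:781-788): A BODY SEGMENT OF A PROTECTED FUNCTION WITH A
  CALL IN THE MIDDLE. The call's return address 0x109fab (`ret2`) is not a cut of the design, so the unit makes it one of its own: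
  a private assertion `cn1_AtRet2` (`Body` + what is live there) and two walks (Lemmas.lean), chained here. The recipe of each walk
  is in farm.gif/hints/protected_frame.md (BODY SEGMENT); the template is farm.gif/worked/DGifGetWord.1.
-/

/-- Segment 1 of `DGifGetCodeNext` takes `Start` at 0x109f8c to `Done` at 0x109fc6 or to `AfterLen` at 0x109fe3. -/
theorem Gif.Spec.Proved.DGifGetCodeNext_1_ok : Gif.Spec.DGifGetCodeNext_1.Statement := by
  intro Lay hLay μ hμ u₀ hcode h_InternalRead h_asan_load8_noabort h_asan_store4_noabort H rest frames F R e ret v hat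
  -- the callee's contract for the frame list of the body (the own frame in front) and the request of 1 byte
  have hir := h_InternalRead H rest (DGifGetCodeNext.framesIn frames e) F R 1
  -- 0x109f8c … the check, the load of `Private`, the call … 0x109fab
  refine (Gif.Spec.DGifGetCodeNext_1.cn1_seg_call Lay hLay μ hμ u₀ hcode H rest frames F R e ret hir h_asan_load8_noabort
    v hat).trans ?_
  -- 0x109fab … 0x109fc6 (`Done`) or 0x109fe3 (`AfterLen`)
  intro v1 hv1
  exact Gif.Spec.DGifGetCodeNext_1.cn1_seg_tail Lay hLay μ hμ u₀ hcode H rest frames F R e ret h_asan_store4_noabort v1 hv1
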